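-- pv_equiv track=rewrite | github.com/JihoAlgorithm/Algorithm | ProblemSolving/Python/boj2999/main.py | solution
-- ===== SOURCE A (Python) =====
-- def solution(message):
--     l = len(message)
--     for r in range(10, 0, -1):
--         c = l // r
--         if c >= r and r * c == l:
--             cols = [message[i : i + r] for i in range(0, l, r)]
--             return "".join(["".join(row) for row in zip(*cols)])
--     raise Exception("INVALID INPUT")
-- ===== SOURCE B (Python) =====
-- def solution(message):
--     l = len(message)
--     # divisor candidates in one ascending pass; pick the last (largest) valid one
--     divs = [r for r in range(1, 11) if l % r == 0 and r * r <= l]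
--     if not divs:
--         raise Exception("INVALID INPUT")
--     r = divs[-1]
--     # single forward pass: distribute each character into bucket i % r,
--     # then the concatenated buckets are exactly the column-major reading
--     buckets = [[] for _ in range(r)]
--     for i, ch in enumerate(message):
--         buckets[i % r].append(ch)
--     return "".join("".join(b) for b in buckets)
-- ===== Notes on version B (the rewrite author's own statement) =====
-- stated objective: alternative
-- what changed: B replaces A's build-row-slices-then-zip(*) transpose by a single forward pass that distributes each character into bucket i % r and concatenates the buckets, and picks r as the last element of an ascending filtered divisor list instead of the first hit of a descending search.
import Mathlib
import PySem

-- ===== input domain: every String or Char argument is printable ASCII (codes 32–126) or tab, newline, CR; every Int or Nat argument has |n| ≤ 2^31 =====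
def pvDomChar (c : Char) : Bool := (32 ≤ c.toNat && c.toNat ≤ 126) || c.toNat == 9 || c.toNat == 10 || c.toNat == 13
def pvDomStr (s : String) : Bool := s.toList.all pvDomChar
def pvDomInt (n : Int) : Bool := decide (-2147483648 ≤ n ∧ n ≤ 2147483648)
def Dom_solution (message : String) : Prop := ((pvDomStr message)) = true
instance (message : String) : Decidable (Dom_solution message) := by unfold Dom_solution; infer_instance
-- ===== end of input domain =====

-- B replaces A's slice-rows-then-zip(*) transpose by a single forward pass distributing each
-- character into bucket i % r and concatenating the buckets; r is chosen as the last of an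
-- ascending filtered divisor list. Equivalence of RETURN values on Pre_ (both raise outside it).


-- ===== PORT A =====
-- zip(*cols): take the heads of all columns while every column is nonempty (exact for Python zip)
def pvZipStar (xss : List (List Char)) : List (List Char) :=
  if _h : xss ≠ [] ∧ xss.all (fun xs => !xs.isEmpty) then
    (xss.map (fun xs => xs.headD ' ')) :: pvZipStar (xss.map List.tail)
  else []
termination_by (xss.headD []).length
decreasing_by
  obtain ⟨hne, hall⟩ := _h
  cases xss with
  | nil => exact absurd rfl hne
  | cons y ys =>
    have hy : y ≠ [] := by
      have := List.all_eq_true.mp hall y (by simp)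
      simpa [List.isEmpty_iff] using this
    cases y with
    | nil => exact absurd rfl hy
    | cons a as => simp

-- the body of A's `for r in range(10, 0, -1)` loop (returns "" where Python raises; excluded by Pre_)
def solGoA (msg : List Char) (l : Int) : List Int → String
  | [] => ""
  | r :: rs =>
    let c := PySem.Int.floordiv l r
    if r ≤ c ∧ r * c = l then
      let cols := (PySem.List.pyRange 0 l r).map
        (fun i => PySem.List.slice msg (some i) (some (i + r)))
      String.mk (pvZipStar cols).flatten
    else solGoA msg l rs

def solution (message : String) : String :=
  let l : Int := PySem.Str.len message
  solGoA message.toList l (PySem.List.pyRange 10 0 (-1))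

-- ===== PORT B =====
-- buckets[i % r].append(ch)
def bstep (r : Int) (bs : List (List Char)) (p : Int × Char) : List (List Char) :=
  let k := (PySem.Int.mod p.1 r).toNat
  bs.set k (bs.getD k [] ++ [p.2])

def solution_alt (message : String) : String :=
  let l : Int := PySem.Str.len message
  let divs := (PySem.List.pyRange 1 11 1).filter
    (fun r => PySem.Int.mod l r == 0 && decide (r * r ≤ l))
  match divs.getLast? with
  | none => ""  -- Python raises Exception here; excluded by Pre_
  | some r =>
    let buckets := (PySem.List.enumerate message.toList 0).foldl (bstep r)
      (List.replicate r.toNat [])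
    String.mk buckets.flatten

-- ===== PRECONDITION & SPEC =====
-- A raises an Exception (and B raises too) exactly when no r in 10..1 divides
-- len(message) with r*r <= len; Pre_ admits exactly the strings on which A returns.
def Pre_solution (message : String) : Prop :=
  ∃ r ∈ PySem.List.pyRange 10 0 (-1),
    PySem.Int.mod (message.toList.length : Int) r = 0 ∧ r * r ≤ (message.toList.length : Int)
instance (message : String) : Decidable (Pre_solution message) := by
  unfold Pre_solution; infer_instance

def pvWitness_solution : String := "abcd"

def Spec_solution (message : String) (out : String) : Prop := out = solution_alt message
instance (message : String) (out : String) : Decidable (Spec_solution message out) := by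
  unfold Spec_solution; infer_instance

-- ===== CLAIM (what is proved, stated in full; the proofs are below) =====
def Claim_equal_solution : Prop :=
  ∀ (message : String), Dom_solution message → Pre_solution message →
    Spec_solution message (solution message)

-- ===== LEMMAS AND PROOFS =====

-- A's loop test  c >= r and r*c == l  is the test  l % r == 0 and r*r <= l  (for r > 0)
theorem pvCond_iff (l r : Int) (hr : 0 < r) :
    (r ≤ PySem.Int.floordiv l r ∧ r * PySem.Int.floordiv l r = l) ↔
    (PySem.Int.mod l r = 0 ∧ r * r ≤ l) := by
  have hmain := PySem.Int.floordiv_mul_add_mod l r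
  set q := PySem.Int.floordiv l r with hq
  set m := PySem.Int.mod l r with hm
  have hcomm : q * r = r * q := mul_comm q r
  constructor
  · rintro ⟨h1, h2⟩
    refine ⟨by linarith, ?_⟩
    have := mul_le_mul_of_nonneg_left h1 hr.le
    linarith
  · rintro ⟨h1, h2⟩
    have h3 : r * q = l := by linarith
    refine ⟨le_of_mul_le_mul_left (by linarith) hr, h3⟩

theorem pvGetD_zero (xs : List Char) (d : Char) : xs.getD 0 d = xs.headD d := by
  cases xs <;> rfl

theorem pvGetD_succ (xs : List Char) (j : Nat) (d : Char) :
    xs.getD (j + 1) d = xs.tail.getD j d := by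
  cases xs <;> rfl

theorem pvZipStar_eq (n : Nat) : ∀ (xss : List (List Char)), xss ≠ [] →
    (∀ xs ∈ xss, xs.length = n) →
    pvZipStar xss = (List.range n).map (fun j => xss.map (fun xs => xs.getD j ' ')) := by
  induction n with
  | zero =>
    intro xss hne hlen
    have hall : xss.all (fun xs => !xs.isEmpty) = false := by
      cases xss with
      | nil => exact absurd rfl hne
      | cons y ys =>
        have hy : y = [] := List.length_eq_zero_iff.mp (hlen y (by simp))
        simp [hy]
    rw [pvZipStar, dif_neg (by simp [hall])]
    simp
  | succ n ih =>
    intro xss hne hlen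
    rw [pvZipStar]
    have hcond : xss ≠ [] ∧ xss.all (fun xs => !xs.isEmpty) := by
      refine ⟨hne, List.all_eq_true.mpr ?_⟩
      intro xs hxs
      have hx := hlen xs hxs
      simp only [Bool.not_eq_eq_eq_not, Bool.not_true, List.isEmpty_eq_false_iff]
      intro h
      simp [h] at hx
    rw [dif_pos hcond]
    rw [ih (xss.map List.tail) (by simpa using hne)
      (by intro xs hxs
          obtain ⟨y, hy, rfl⟩ := List.mem_map.mp hxs
          have := hlen y hy
          simp [List.length_tail, this])]
    rw [List.range_succ_eq_map, List.map_cons, List.map_map]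
    congr 1
    · exact List.map_congr_left (fun xs _ => (pvGetD_zero xs ' ').symm)
    · refine List.map_congr_left (fun j _ => ?_)
      rw [List.map_map]
      refine List.map_congr_left (fun xs _ => ?_)
      simp only [Function.comp, Nat.succ_eq_add_one]
      rw [pvGetD_succ]

-- (take R (drop a msg)).getD j = msg[a+j] for j < R
theorem pvChunk_getD (msg : List Char) (a R j : Nat) (hj : j < R) :
    ((msg.drop a).take R).getD j ' ' = (msg[a + j]?).getD ' ' := by
  rw [List.getD_eq_getElem?_getD, List.getElem?_take_of_lt hj, List.getElem?_drop]

-- range(0, r*c, r) for r > 0, c > 0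
theorem pvRange_step (r c : Int) (hr : 0 < r) (hc : 0 < c) :
    PySem.List.pyRange 0 (r * c) r =
      (List.range c.toNat).map (fun (k : Nat) => r * (k : Int)) := by
  rw [PySem.List.pyRange_of_pos 0 (r * c) hr]
  have hpos : (0 : Int) < r * c := mul_pos hr hc
  rw [if_pos hpos]
  have hdiv : (r * c - 0 + r - 1) / r = c := by
    have h1 : r * c - 0 + r - 1 = (r - 1) + c * r := by ring
    rw [h1, Int.add_mul_ediv_right _ _ (ne_of_gt hr),
      Int.ediv_eq_zero_of_lt (by omega) (by omega)]
    omega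
  rw [hdiv]
  exact List.map_congr_left (fun k _ => by ring)

-- the characters of column j (counter a, residue a % R selects the bucket)
def pvColOf (R j : Nat) : List Char → Nat → List Char
  | [], _ => []
  | x :: xs, a => if a % R = j then x :: pvColOf R j xs (a + 1) else pvColOf R j xs (a + 1)

theorem pvColOf_append (R j : Nat) : ∀ (ys zs : List Char) (a : Nat),
    pvColOf R j (ys ++ zs) a = pvColOf R j ys a ++ pvColOf R j zs (a + ys.length) := by
  intro ys
  induction ys with
  | nil => intro zs a; simp [pvColOf]
  | cons y ys ih =>
    intro zs a
    simp only [List.cons_append, pvColOf, List.length_cons]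
    rw [ih zs (a + 1)]
    split_ifs <;> simp [List.cons_append] <;> ring_nf

theorem pvColOf_mod (R j : Nat) : ∀ (xs : List Char) (a b : Nat), a % R = b % R →
    pvColOf R j xs a = pvColOf R j xs b := by
  intro xs
  induction xs with
  | nil => intro a b _; rfl
  | cons x xs ih =>
    intro a b hab
    have h1 : (a + 1) % R = (b + 1) % R := by
      rw [Nat.add_mod a 1 R, Nat.add_mod b 1 R, hab]
    simp only [pvColOf, hab]
    rw [ih (a + 1) (b + 1) h1]

theorem pvColOf_row (R j : Nat) (hj : j < R) : ∀ (row : List Char) (t : Nat),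
    t + row.length = R →
    pvColOf R j row t = if t ≤ j then [row.getD (j - t) ' '] else [] := by
  intro row
  induction row with
  | nil =>
    intro t ht
    simp only [List.length_nil, Nat.add_zero] at ht
    rw [pvColOf, if_neg (by omega)]
  | cons x xs ih =>
    intro t ht
    simp only [List.length_cons] at ht
    have htR : t < R := by omega
    have htm : t % R = t := Nat.mod_eq_of_lt htR
    rw [pvColOf, htm, ih (t + 1) (by omega)]
    by_cases hjt : t = j
    · subst hjt
      rw [if_pos rfl, if_neg (by omega), if_pos le_rfl]
      simp
    · rw [if_neg hjt]
      by_cases hle : t ≤ j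
      · have h1 : t + 1 ≤ j := by omega
        rw [if_pos h1, if_pos hle]
        have h2 : j - t = (j - (t + 1)) + 1 := by omega
        rw [h2, pvGetD_succ]
        rfl
      · rw [if_neg (by omega), if_neg hle]

theorem pvColOf_eq (R j : Nat) (hR : 0 < R) (hj : j < R) : ∀ (C : Nat) (xs : List Char),
    xs.length = R * C →
    pvColOf R j xs 0 = (List.range C).map (fun k => xs.getD (k * R + j) ' ') := by
  intro C
  induction C with
  | zero =>
    intro xs hx
    simp only [Nat.mul_zero] at hx
    rw [List.length_eq_zero_iff.mp hx]
    rfl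
  | succ C ih =>
    intro xs hx
    have hx' : xs.length = R * C + R := by rw [hx, Nat.mul_succ]
    have hsplit : xs = xs.take R ++ xs.drop R := (List.take_append_drop R xs).symm
    have hrowlen : (xs.take R).length = R := by
      rw [List.length_take]; omega
    have hrest : (xs.drop R).length = R * C := by
      rw [List.length_drop]; omega
    conv_lhs => rw [hsplit]
    rw [pvColOf_append, hrowlen,
      pvColOf_mod R j (xs.drop R) (0 + R) 0 (by simp),
      ih (xs.drop R) hrest,
      pvColOf_row R j hj (xs.take R) 0 (by omega), if_pos (Nat.zero_le j)]
    rw [List.range_succ_eq_map, List.map_cons, List.map_map, List.singleton_append]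
    congr 1
    · simp only [Nat.zero_mul, Nat.zero_add, Nat.sub_zero]
      rw [List.getD_eq_getElem?_getD, List.getD_eq_getElem?_getD,
        List.getElem?_take_of_lt hj]
    · refine List.map_congr_left (fun k _ => ?_)
      simp only [Function.comp, Nat.succ_eq_add_one]
      rw [List.getD_eq_getElem?_getD, List.getD_eq_getElem?_getD, List.getElem?_drop]
      congr 2
      ring

theorem pvReplicate_getD (R j : Nat) : (List.replicate R ([] : List Char)).getD j [] = [] := by
  rw [List.getD_eq_getElem?_getD, List.getElem?_replicate]
  split_ifs <;> rfl

theorem pvSetD (bs : List (List Char)) (k j : Nat) (v : List Char) (hj : j < bs.length) :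
    (bs.set k v).getD j [] = if k = j then v else bs.getD j [] := by
  rw [List.getD_eq_getElem?_getD, List.getD_eq_getElem?_getD, List.getElem?_set]
  split_ifs with h1 h2
  · rfl
  · exact absurd (h1 ▸ hj) h2
  · rfl

-- the bucket fold, characterised: bucket j collects the column-j characters
theorem pvFoldChar (R : Nat) (hR : 0 < R) : ∀ (xs : List Char) (a : Nat)
    (bs : List (List Char)), bs.length = R →
    (PySem.List.enumerate xs (a : Int)).foldl (bstep (R : Int)) bs
      = (List.range R).map (fun j => bs.getD j [] ++ pvColOf R j xs a) := by
  intro xs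
  induction xs with
  | nil =>
    intro a bs hbs
    rw [PySem.List.enumerate_nil, List.foldl_nil]
    refine List.ext_getElem (by simp [hbs]) ?_
    intro i h1 h2
    simp only [List.getElem_map, List.getElem_range, pvColOf, List.append_nil]
    rw [List.getD_eq_getElem?_getD, List.getElem?_eq_getElem h1]
    rfl
  | cons x xs ih =>
    intro a bs hbs
    rw [PySem.List.enumerate_cons, List.foldl_cons]
    have hcast : (a : Int) + 1 = ((a + 1 : Nat) : Int) := by push_cast; ring
    rw [hcast]
    have hstep : bstep (R : Int) bs ((a : Int), x)
        = bs.set (a % R) (bs.getD (a % R) [] ++ [x]) := by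
      simp only [bstep, PySem.Int.mod_natCast, Int.toNat_natCast]
    rw [hstep, ih (a + 1) _ (by simp [hbs])]
    refine List.map_congr_left (fun j hj => ?_)
    have hjR : j < R := List.mem_range.mp hj
    have hmR : a % R < R := Nat.mod_lt a hR
    rw [pvSetD bs (a % R) j _ (by omega)]
    simp only [pvColOf]
    by_cases h : a % R = j
    · rw [if_pos h, if_pos h, List.append_assoc, h, List.singleton_append]
    · rw [if_neg h, if_neg h]

-- the last valid divisor of the ascending list is the first of the descending search
theorem pvLast_filter (p : Int → Bool) : ∀ (xs : List Int),
    (xs.filter p).getLast? = xs.reverse.find? p := by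
  intro xs
  induction xs with
  | nil => rfl
  | cons a xs ih =>
    rw [List.reverse_cons, List.find?_append, ← ih]
    by_cases h : p a
    · rw [List.filter_cons_of_pos h]
      cases hc : (xs.filter p).getLast? with
      | none =>
        have hnil : xs.filter p = [] := List.getLast?_eq_none_iff.mp hc
        simp [hnil, List.find?, h]
      | some b =>
        have hne : xs.filter p ≠ [] := by
          intro hn
          rw [hn] at hc
          simp at hc
        rw [List.getLast?_cons, hc]
        simp
    · rw [List.filter_cons_of_neg h]
      cases hc : (xs.filter p).getLast? <;> simp [List.find?, h]

-- A's descending loop = find? with any predicate that agrees with the loop test on members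
theorem pvGo_eq (msg : List Char) (p : Int → Bool) : ∀ (rs : List Int),
    (∀ r ∈ rs, 0 < r ∧ p r = (PySem.Int.mod (msg.length : Int) r == 0
        && decide (r * r ≤ (msg.length : Int)))) →
    solGoA msg (msg.length : Int) rs =
      match rs.find? p with
      | none => ""
      | some r =>
        String.mk (pvZipStar ((PySem.List.pyRange 0 (msg.length : Int) r).map
          (fun i => PySem.List.slice msg (some i) (some (i + r))))).flatten := by
  intro rs
  induction rs with
  | nil => intro _; rfl
  | cons a as ih =>
    intro hpos
    obtain ⟨ha, hpa⟩ := hpos a (by simp)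
    rw [solGoA, List.find?]
    by_cases hc : PySem.Int.mod (msg.length : Int) a = 0 ∧ a * a ≤ (msg.length : Int)
    · have hb : p a = true := by rw [hpa]; simp [hc.1, hc.2]
      rw [if_pos ((pvCond_iff _ a ha).mpr hc), hb]
    · have hb : p a = false := by
        rw [hpa]
        by_cases h1 : PySem.Int.mod (msg.length : Int) a = 0
        · have h2 : ¬ a * a ≤ (msg.length : Int) := fun h2 => hc ⟨h1, h2⟩
          simp [h1, h2]
        · simp [h1]
      rw [if_neg (fun h => hc ((pvCond_iff _ a ha).mp h)), hb]
      exact ih (fun r hrm => hpos r (by simp [hrm]))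

-- for the selected r the two output expressions agree
theorem pvOut_eq (msg : List Char) (r : Int) (hr : 0 < r)
    (hdvd : PySem.Int.mod (msg.length : Int) r = 0)
    (hsq : r * r ≤ (msg.length : Int)) :
    String.mk (pvZipStar ((PySem.List.pyRange 0 (msg.length : Int) r).map
        (fun i => PySem.List.slice msg (some i) (some (i + r))))).flatten
    = String.mk (((PySem.List.enumerate msg 0).foldl (bstep r)
        (List.replicate r.toNat [])).flatten) := by
  set l : Int := (msg.length : Int) with hl
  set c := PySem.Int.floordiv l r with hcdef
  have hmain := PySem.Int.floordiv_mul_add_mod l r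
  have hlc : r * c = l := by
    have : c * r + 0 = l := by rw [← hdvd]; exact hmain
    linarith [mul_comm c r]
  have hrc : r ≤ c := le_of_mul_le_mul_left (by linarith) hr
  have hc : 0 < c := lt_of_lt_of_le hr hrc
  obtain ⟨R, hR⟩ : ∃ R : Nat, r = (R : Int) := ⟨r.toNat, (Int.toNat_of_nonneg hr.le).symm⟩
  obtain ⟨C, hC⟩ : ∃ C : Nat, c = (C : Int) := ⟨c.toNat, (Int.toNat_of_nonneg hc.le).symm⟩
  have hRpos : 0 < R := by omega
  have hCpos : 0 < C := by omega
  have hlen : msg.length = R * C := by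
    have h2 : l = ((R * C : Nat) : Int) := by rw [← hlc, hR, hC]; push_cast; ring
    rw [hl] at h2
    exact_mod_cast h2
  -- A side: the columns are take/drop chunks of length R
  have hrange : PySem.List.pyRange 0 l r = (List.range C).map (fun (k : Nat) => r * (k : Int)) := by
    rw [← hlc, pvRange_step r c hr hc, show c.toNat = C by omega]
  have hcols : (PySem.List.pyRange 0 l r).map
      (fun i => PySem.List.slice msg (some i) (some (i + r))) =
      (List.range C).map (fun k => (msg.drop (R * k)).take R) := by
    rw [hrange, List.map_map]
    refine List.map_congr_left (fun k _ => ?_)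
    simp only [Function.comp]
    have h1 : r * (k : Int) = ((R * k : Nat) : Int) := by rw [hR]; push_cast; ring
    rw [h1, hR]
    exact_mod_cast PySem.List.slice_natCast_add msg (R * k) R
  have hcolsne : (List.range C).map (fun k => (msg.drop (R * k)).take R) ≠ [] := by
    apply List.ne_nil_of_length_pos
    simpa using hCpos
  have hcolslen : ∀ xs ∈ (List.range C).map (fun k => (msg.drop (R * k)).take R),
      xs.length = R := by
    intro xs hxs
    obtain ⟨k, hk, rfl⟩ := List.mem_map.mp hxs
    have hk' : k < C := List.mem_range.mp hk
    have hle : R * k + R ≤ msg.length := by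
      rw [hlen]
      calc R * k + R = R * (k + 1) := by ring
      _ ≤ R * C := Nat.mul_le_mul_left R hk'
    simp only [List.length_take, List.length_drop]
    omega
  rw [hcols, pvZipStar_eq R _ hcolsne hcolslen]
  -- B side: the fold of the enumerate pass is the list of columns
  rw [hR, Int.toNat_natCast, show (0 : Int) = ((0 : Nat) : Int) from rfl,
    pvFoldChar R hRpos msg 0 (List.replicate R []) (by simp)]
  congr 1
  refine congrArg List.flatten ?_
  refine List.map_congr_left (fun j hj => ?_)
  have hjR : j < R := List.mem_range.mp hj
  rw [pvReplicate_getD, List.nil_append,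
    pvColOf_eq R j hRpos hjR C msg hlen, List.map_map]
  refine List.map_congr_left (fun k hk => ?_)
  simp only [Function.comp]
  rw [pvChunk_getD msg (R * k) R j hjR, List.getD_eq_getElem?_getD]
  congr 2
  ring

-- the whole pipeline, with the scrutinee shared between the two sides
theorem pvMain (msg : List Char) (p : Int → Bool)
    (hp : ∀ r ∈ PySem.List.pyRange 10 0 (-1),
      p r = (PySem.Int.mod (msg.length : Int) r == 0
        && decide (r * r ≤ (msg.length : Int)))) :
    solGoA msg (msg.length : Int) (PySem.List.pyRange 10 0 (-1)) =
      match ((PySem.List.pyRange 1 11 1).filter p).getLast? with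
      | none => ""
      | some r =>
        String.mk (((PySem.List.enumerate msg 0).foldl (bstep r)
          (List.replicate r.toNat [])).flatten) := by
  have hallpos : ∀ r ∈ PySem.List.pyRange 10 0 (-1), 0 < r := by decide
  rw [pvGo_eq msg p _ (fun r hr => ⟨hallpos r hr, hp r hr⟩),
    show PySem.List.pyRange 1 11 1 = (PySem.List.pyRange 10 0 (-1)).reverse from by decide,
    pvLast_filter p, List.reverse_reverse]
  cases hf : (PySem.List.pyRange 10 0 (-1)).find? p with
  | none => rfl
  | some r =>
    have hmem : r ∈ PySem.List.pyRange 10 0 (-1) := List.mem_of_find?_eq_some hf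
    have hpr : p r = true := List.find?_some hf
    rw [hp r hmem] at hpr
    simp only [Bool.and_eq_true, beq_iff_eq, decide_eq_true_eq] at hpr
    exact pvOut_eq msg r (hallpos r hmem) hpr.1 hpr.2

-- ===== VERDICT (by name: the statement is the Claim_ definition above) =====
theorem solution_spec : Claim_equal_solution := by
  intro message _ _
  unfold Spec_solution solution solution_alt
  simp only [PySem.Str.len_eq]
  exact pvMain message.toList _ (fun r _ => rfl)
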